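-- pv_equiv track=rewrite | github.com/ri5pekt/lost-orders | pdf-service/app.py | build_subject_query_chunks
-- ===== SOURCE A (Python) =====
-- from typing import Callable, Dict, List, Optional, Set, Tuple
--
-- def build_subject_query_chunks(
--     order_ids: List[str],
--     email_address: str,
--     after_date: str,
--     include_address_filter: bool = True,
--     chunk_size: int = 50,
--     max_query_len: int = 2000,
-- ) -> List[str]:
--     addr = f"(from:{email_address} OR to:{email_address}) " if include_address_filter else ""
--     after = f"after:{after_date} " if after_date else ""
--     chunks: List[str] = []
--     current: List[str] = []
--     for oid in order_ids:
--         current.append(oid)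
--         subject_part = " OR ".join(f"#{x}" for x in current)
--         q = f"{addr}{after}subject:({subject_part})"
--         if len(current) >= chunk_size or len(q) > max_query_len:
--             current.pop()
--             if current:
--                 subject_part = " OR ".join(f"#{x}" for x in current)
--                 chunks.append(f"{addr}{after}subject:({subject_part})")
--             current = [oid]
--     if current:
--         subject_part = " OR ".join(f"#{x}" for x in current)
--         chunks.append(f"{addr}{after}subject:({subject_part})")
--     return chunks
-- ===== SOURCE B (Python) =====
-- from typing import List
--
--
-- def build_subject_query_chunks(
--     order_ids: List[str],
--     email_address: str,
--     after_date: str,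
--     include_address_filter: bool = True,
--     chunk_size: int = 50,
--     max_query_len: int = 2000,
-- ) -> List[str]:
--     addr = f"(from:{email_address} OR to:{email_address}) " if include_address_filter else ""
--     after = f"after:{after_date} " if after_date else ""
--     header = addr + after
--     base = len(header) + len("subject:()")
--     toks = ["#" + oid for oid in order_ids]
--     pre = [0]
--     for t in toks:
--         pre.append(pre[-1] + len(t))
--     # query length for the m ids starting at s: base + token chars + 4 per " OR " separator
--     chunks: List[str] = []
--     n = len(order_ids)
--     s = 0
--     while s < n:
--         def ok(j: int) -> bool:
--             return j < chunk_size and base + (pre[s + j] - pre[s]) + 4 * (j - 1) <= max_query_len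
--         if ok(1):
--             lo, hi = 1, n - s
--             while lo < hi:  # binary search: largest j in [lo, hi] with ok(j)
--                 mid = (lo + hi + 1) // 2
--                 if ok(mid):
--                     lo = mid
--                 else:
--                     hi = mid - 1
--             m = lo
--         else:
--             m = 1  # a chunk always takes at least one id, even alone over the limit
--         chunks.append(header + "subject:(" + " OR ".join(toks[s:s + m]) + ")")
--         s += m
--     return chunks
-- ===== Notes on version B (the rewrite author's own statement) =====
-- stated objective: alternative
-- what changed: Instead of re-building and re-measuring the joined query string after every appended id, B precomputes '#'-token lengths and a prefix-sum array, computes candidate query lengths arithmetically, and binary-searches the largest chunk end for each start index.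
import Mathlib
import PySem

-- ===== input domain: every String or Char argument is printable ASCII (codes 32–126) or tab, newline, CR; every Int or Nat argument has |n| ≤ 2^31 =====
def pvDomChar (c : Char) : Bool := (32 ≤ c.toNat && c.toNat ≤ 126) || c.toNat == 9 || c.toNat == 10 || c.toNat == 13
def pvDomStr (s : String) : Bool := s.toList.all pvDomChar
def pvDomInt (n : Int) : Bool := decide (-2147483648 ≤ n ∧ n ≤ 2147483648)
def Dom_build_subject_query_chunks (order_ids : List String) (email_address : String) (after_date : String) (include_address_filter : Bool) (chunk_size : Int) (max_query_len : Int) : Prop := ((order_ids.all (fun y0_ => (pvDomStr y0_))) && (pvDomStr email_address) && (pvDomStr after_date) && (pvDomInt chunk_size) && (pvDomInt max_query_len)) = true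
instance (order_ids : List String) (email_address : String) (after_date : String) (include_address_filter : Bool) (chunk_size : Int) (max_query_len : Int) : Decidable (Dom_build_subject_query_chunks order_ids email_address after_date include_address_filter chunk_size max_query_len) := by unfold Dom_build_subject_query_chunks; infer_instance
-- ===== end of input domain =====

-- B replaces A's rebuild-the-join-and-measure-it inner scan by token-length prefix sums and a
-- binary search for each chunk's end boundary (objective: alternative algorithm, same cost).

-- ===== PORT A =====
-- shared formatting helpers (both Pythons compute f"#{x}" and the addr/after header identically)
def pvFmt (x : String) : List Char := '#' :: x.toList

def pvHeader (email_address : String) (after_date : String) (include_address_filter : Bool) : List Char :=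
  (if include_address_filter then
      "(from:".toList ++ email_address.toList ++ " OR to:".toList ++ email_address.toList ++ ") ".toList
   else []) ++
  (if after_date.toList ≠ [] then "after:".toList ++ after_date.toList ++ [' '] else [])

def pvQueryA (header : List Char) (cur : List String) : List Char :=
  header ++ "subject:(".toList ++ PySem.Chars.join " OR ".toList (cur.map pvFmt) ++ [')']

def pvStepA (header : List Char) (chunk_size max_query_len : Int)
    (st : List String × List String) (oid : String) : List String × List String :=
  let current := st.2 ++ [oid]
  let q := pvQueryA header current
  if chunk_size ≤ (current.length : Int) ∨ max_query_len < (q.length : Int) then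
    let current' := current.dropLast
    let chunks := if current' ≠ [] then st.1 ++ [String.ofList (pvQueryA header current')] else st.1
    (chunks, [oid])
  else (st.1, current)

def build_subject_query_chunks (order_ids : List String) (email_address : String) (after_date : String) (include_address_filter : Bool) (chunk_size : Int) (max_query_len : Int) : List String :=
  let header := pvHeader email_address after_date include_address_filter
  let st := order_ids.foldl (pvStepA header chunk_size max_query_len) ([], [])
  if st.2 ≠ [] then st.1 ++ [String.ofList (pvQueryA header st.2)] else st.1

-- ===== PORT B =====
def pvPre (toks : List (List Char)) : List Int :=
  toks.foldl (fun p t => p ++ [PySem.List.pyGetD p (-1) 0 + (t.length : Int)]) [0]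

def pvOkB (pre : List Int) (base chunk_size max_query_len s : Int) (j : Int) : Bool :=
  decide (j < chunk_size) &&
  decide (base + (PySem.List.pyGetD pre (s + j) 0 - PySem.List.pyGetD pre s 0) + 4 * (j - 1) ≤ max_query_len)

-- the inner `while lo < hi` binary search of Source B (fuel = hi - lo, enough since the
-- bracket shrinks every iteration; it only guards totality)
def pvBisectF : Nat → (Int → Bool) → Int → Int → Int
  | 0, _, lo, _ => lo
  | fuel + 1, ok, lo, hi =>
    if lo < hi then
      let mid := PySem.Int.floordiv (lo + hi + 1) 2
      if ok mid then pvBisectF fuel ok mid hi else pvBisectF fuel ok lo (mid - 1)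
    else lo

def pvBisect (ok : Int → Bool) (lo hi : Int) : Int :=
  pvBisectF (hi - lo).toNat ok lo hi

def pvChunkLen (ok : Int → Bool) (rem : Int) : Int :=
  if ok 1 then pvBisect ok 1 rem else 1

-- the outer `while s < n` loop of Source B (fuel = n - s; s grows by ≥ 1 per chunk)
def pvLoopBF (toks : List (List Char)) (pre : List Int) (header : List Char)
    (base chunk_size max_query_len n : Int) : Nat → Int → List String
  | 0, _ => []
  | fuel + 1, s =>
    if s < n then
      let m := pvChunkLen (pvOkB pre base chunk_size max_query_len s) (n - s)
      String.ofList (header ++ "subject:(".toList ++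
          PySem.Chars.join " OR ".toList (PySem.List.slice toks (some s) (some (s + m))) ++ [')'])
        :: pvLoopBF toks pre header base chunk_size max_query_len n fuel (s + m)
    else []

def pvLoopB (toks : List (List Char)) (pre : List Int) (header : List Char)
    (base chunk_size max_query_len n : Int) (s : Int) : List String :=
  pvLoopBF toks pre header base chunk_size max_query_len n (n - s).toNat s

def build_subject_query_chunks_alt (order_ids : List String) (email_address : String) (after_date : String) (include_address_filter : Bool) (chunk_size : Int) (max_query_len : Int) : List String :=
  let header := pvHeader email_address after_date include_address_filter
  let base : Int := (header.length : Int) + ("subject:()".toList.length : Int)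
  let toks := order_ids.map pvFmt
  let pre := pvPre toks
  let n : Int := (order_ids.length : Int)
  pvLoopB toks pre header base chunk_size max_query_len n 0

-- ===== PRECONDITION & SPEC =====
def Spec_build_subject_query_chunks (order_ids : List String) (email_address : String) (after_date : String) (include_address_filter : Bool) (chunk_size : Int) (max_query_len : Int) (out : List String) : Prop := out = build_subject_query_chunks_alt order_ids email_address after_date include_address_filter chunk_size max_query_len
instance (order_ids : List String) (email_address : String) (after_date : String) (include_address_filter : Bool) (chunk_size : Int) (max_query_len : Int) (out : List String) : Decidable (Spec_build_subject_query_chunks order_ids email_address after_date include_address_filter chunk_size max_query_len out) := by unfold Spec_build_subject_query_chunks; infer_instance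

-- ===== CLAIM (what is proved, stated in full; the proofs are below) =====
def Claim_equal_build_subject_query_chunks : Prop := ∀ (order_ids : List String) (email_address : String) (after_date : String) (include_address_filter : Bool) (chunk_size : Int) (max_query_len : Int), Dom_build_subject_query_chunks order_ids email_address after_date include_address_filter chunk_size max_query_len → Spec_build_subject_query_chunks order_ids email_address after_date include_address_filter chunk_size max_query_len (build_subject_query_chunks order_ids email_address after_date include_address_filter chunk_size max_query_len)

-- ===== LEMMAS AND PROOFS =====

def pvW (x : String) : Int := (x.toList.length : Int) + 1
def pvSumW (l : List String) : Int := (l.map pvW).sum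

theorem pvJoin_len (parts : List (List Char)) (hne : parts ≠ []) :
    ((PySem.Chars.join " OR ".toList parts).length : Int)
      = (parts.map (fun t => (t.length : Int))).sum + 4 * ((parts.length : Int) - 1) := by
  induction parts with
  | nil => exact absurd rfl hne
  | cons t rest ih =>
    cases rest with
    | nil => simp [PySem.Chars.join_singleton]
    | cons t2 r2 =>
      rw [PySem.Chars.join_cons_cons]
      have h4 : ((" OR ".toList : List Char).length : Int) = 4 := by decide
      have := ih (by simp)
      simp only [List.length_append, List.map_cons, List.sum_cons, List.length_cons] at *
      push_cast at *
      omega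

theorem pvQlen (header : List Char) (cur : List String) (hne : cur ≠ []) :
    ((pvQueryA header cur).length : Int)
      = (header.length : Int) + 10 + pvSumW cur + 4 * ((cur.length : Int) - 1) := by
  unfold pvQueryA
  have hj := pvJoin_len (cur.map pvFmt) (by simpa using hne)
  have hmap : (cur.map pvFmt).map (fun t => (t.length : Int)) = cur.map pvW := by
    simp [pvFmt, pvW, Function.comp]
  rw [hmap] at hj
  have h9 : "subject:(".toList.length = 9 := by decide
  simp only [List.length_append, h9, List.length_map, List.length_cons, List.length_nil] at *
  push_cast at *
  unfold pvSumW
  omega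
def pvOkP (header : List Char) (cs ml : Int) (u : List String) (j : Nat) : Prop :=
  (j : Int) < cs ∧ (header.length : Int) + 10 + pvSumW (u.take j) + 4 * ((j : Int) - 1) ≤ ml

def pvRef (header : List Char) (cs ml : Int) : List String → List String → List String
  | cur, [] => if cur ≠ [] then [String.ofList (pvQueryA header cur)] else []
  | cur, oid :: rest =>
      if cs ≤ ((cur ++ [oid]).length : Int) ∨ ml < ((pvQueryA header (cur ++ [oid])).length : Int) then
        (if cur ≠ [] then [String.ofList (pvQueryA header cur)] else []) ++ pvRef header cs ml [oid] rest
      else pvRef header cs ml (cur ++ [oid]) rest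

theorem pvTrigger_iff (header : List Char) (cs ml : Int) (u : List String) (j : Nat)
    (h1 : 1 ≤ j) (h2 : j ≤ u.length) :
    (cs ≤ (((u.take j).length : Int)) ∨ ml < ((pvQueryA header (u.take j)).length : Int))
      ↔ ¬ pvOkP header cs ml u j := by
  have hne : u.take j ≠ [] := List.ne_nil_of_length_pos (by
    rw [List.length_take]
    omega)
  rw [pvQlen header _ hne]
  unfold pvOkP
  simp only [List.length_take]
  push_cast
  omega

theorem pvSumW_take_mono (u : List String) (i j : Nat) (hij : i ≤ j) :
    pvSumW (u.take i) ≤ pvSumW (u.take j) := by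
  have : u.take j = u.take i ++ ((u.drop i).take (j - i)) := by
    rw [← List.take_add]
    congr 1
    omega
  rw [this]
  unfold pvSumW
  rw [List.map_append, List.sum_append]
  have : 0 ≤ (((u.drop i).take (j - i)).map pvW).sum := by
    apply List.sum_nonneg
    intro x hx
    simp only [List.mem_map] at hx
    obtain ⟨y, _, rfl⟩ := hx
    unfold pvW
    positivity
  omega

theorem pvOkP_mono (header : List Char) (cs ml : Int) (u : List String) (i j : Nat)
    (hij : i ≤ j) (h : pvOkP header cs ml u j) : pvOkP header cs ml u i := by
  obtain ⟨h1, h2⟩ := h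
  have := pvSumW_take_mono u i j hij
  exact ⟨by omega, by omega⟩

theorem pvRef_nil_cons (header : List Char) (cs ml : Int) (y : String) (rest : List String) :
    pvRef header cs ml [] (y :: rest) = pvRef header cs ml [y] rest := by
  simp only [pvRef]
  split_ifs <;> simp_all

theorem pvFoldA (header : List Char) (cs ml : Int) :
    ∀ (ids chunks cur : List String),
      (if (ids.foldl (pvStepA header cs ml) (chunks, cur)).2 ≠ [] then
          (ids.foldl (pvStepA header cs ml) (chunks, cur)).1
            ++ [String.ofList (pvQueryA header (ids.foldl (pvStepA header cs ml) (chunks, cur)).2)]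
        else (ids.foldl (pvStepA header cs ml) (chunks, cur)).1)
      = chunks ++ pvRef header cs ml cur ids := by
  intro ids
  induction ids with
  | nil =>
    intro chunks cur
    simp only [List.foldl_nil, pvRef]
    split_ifs <;> simp
  | cons oid rest ih =>
    intro chunks cur
    simp only [List.foldl_cons]
    by_cases hc : cs ≤ ((cur ++ [oid]).length : Int) ∨ ml < ((pvQueryA header (cur ++ [oid])).length : Int)
    · have hstep : pvStepA header cs ml (chunks, cur) oid
          = ((if cur ≠ [] then chunks ++ [String.ofList (pvQueryA header cur)] else chunks), [oid]) := by
        unfold pvStepA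
        simp only []
        rw [if_pos hc]
        simp
      rw [hstep, ih]
      simp only [pvRef]
      rw [if_pos hc]
      split_ifs <;> simp
    · have hstep : pvStepA header cs ml (chunks, cur) oid = (chunks, cur ++ [oid]) := by
        unfold pvStepA
        simp only []
        rw [if_neg hc]
      rw [hstep, ih]
      simp only [pvRef]
      rw [if_neg hc]
theorem pvBisectF_ge (fuel : Nat) (ok : Int → Bool) : ∀ (lo hi : Int), lo ≤ pvBisectF fuel ok lo hi := by
  induction fuel with
  | zero => intro lo hi; simp [pvBisectF]
  | succ fuel ih =>
    intro lo hi
    simp only [pvBisectF]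
    split
    · next h =>
      have hmid : lo < PySem.Int.floordiv (lo + hi + 1) 2 := by
        simp only [PySem.Int.floordiv_eq_ediv_of_pos (by norm_num : (0:Int) < 2)]
        omega
      split
      · have := ih (PySem.Int.floordiv (lo + hi + 1) 2) hi
        omega
      · exact ih lo _
    · exact le_refl _

theorem pvChunkLen_ge (ok : Int → Bool) (rem : Int) : 1 ≤ pvChunkLen ok rem := by
  unfold pvChunkLen
  split
  · exact pvBisectF_ge _ ok 1 rem
  · omega

theorem pvBisectF_spec (fuel : Nat) (ok : Int → Bool) :
    ∀ (lo hi : Int), (hi - lo).toNat ≤ fuel → ok lo = true →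
    (∀ i j : Int, lo ≤ i → i ≤ j → j ≤ hi → ok j = true → ok i = true) →
    lo ≤ pvBisectF fuel ok lo hi ∧ pvBisectF fuel ok lo hi ≤ max lo hi ∧
      ok (pvBisectF fuel ok lo hi) = true ∧
      ∀ j : Int, pvBisectF fuel ok lo hi < j → j ≤ hi → ok j = false := by
  induction fuel with
  | zero =>
    intro lo hi hf hlo _
    simp only [pvBisectF]
    exact ⟨le_refl _, by omega, hlo, fun j hj1 hj2 => by omega⟩
  | succ fuel ih =>
    intro lo hi hf hlo mono
    simp only [pvBisectF]
    split
    · next h =>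
      set mid := PySem.Int.floordiv (lo + hi + 1) 2 with hmdef
      have hmid : lo < mid ∧ mid ≤ hi := by
        constructor <;>
          · simp only [hmdef, PySem.Int.floordiv_eq_ediv_of_pos (by norm_num : (0:Int) < 2)]
            omega
      split
      · next hok =>
        have mono' : ∀ i j : Int, mid ≤ i → i ≤ j → j ≤ hi → ok j = true → ok i = true := by
          intro i j h1 h2 h3 h4
          exact mono i j (by omega) h2 h3 h4
        obtain ⟨g1, g2, g3, g4⟩ := ih mid hi (by omega) hok mono'
        refine ⟨by omega, by omega, g3, ?_⟩
        intro j hj1 hj2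
        exact g4 j hj1 hj2
      · next hok =>
        have hok' : ok mid = false := by
          cases hcase : ok mid with
          | false => rfl
          | true => exact absurd hcase hok
        have mono' : ∀ i j : Int, lo ≤ i → i ≤ j → j ≤ mid - 1 → ok j = true → ok i = true := by
          intro i j h1 h2 h3 h4
          exact mono i j h1 h2 (by omega) h4
        obtain ⟨g1, g2, g3, g4⟩ := ih lo (mid - 1) (by omega) hlo mono'
        refine ⟨g1, by omega, g3, ?_⟩
        intro j hj1 hj2
        by_cases hjm : j ≤ mid - 1
        · exact g4 j hj1 hjm
        · cases hoj : ok j with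
          | false => rfl
          | true =>
            have : ok mid = true := mono mid j (by omega) (by omega) hj2 hoj
            rw [this] at hok'
            cases hok'
    · next h =>
      exact ⟨le_refl _, by omega, hlo, fun j hj1 hj2 => by omega⟩

theorem pvBisect_spec (ok : Int → Bool) (lo hi : Int) :
    ok lo = true →
    (∀ i j : Int, lo ≤ i → i ≤ j → j ≤ hi → ok j = true → ok i = true) →
    lo ≤ pvBisect ok lo hi ∧ pvBisect ok lo hi ≤ max lo hi ∧ ok (pvBisect ok lo hi) = true ∧
      ∀ j : Int, pvBisect ok lo hi < j → j ≤ hi → ok j = false := by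
  intro hlo mono
  exact pvBisectF_spec (hi - lo).toNat ok lo hi (le_refl _) hlo mono

theorem pvPre_eq (toks : List (List Char)) :
    pvPre toks = (List.range (toks.length + 1)).map
      (fun k => ((toks.take k).map (fun t => (t.length : Int))).sum) := by
  induction toks using List.reverseRecOn with
  | nil => simp [pvPre, List.range_succ]
  | append_singleton toks t ih =>
    have hfold : pvPre (toks ++ [t])
        = pvPre toks ++ [PySem.List.pyGetD (pvPre toks) (-1) 0 + (t.length : Int)] := by
      unfold pvPre
      rw [List.foldl_append]
      simp
    have hne : pvPre toks ≠ [] := by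
      rw [ih]
      simp [List.range_succ]
    have hlast : PySem.List.pyGetD (pvPre toks) (-1) 0
        = ((toks.map (fun t2 => (t2.length : Int))).sum) := by
      rw [ih, List.range_succ, List.map_append]
      simp only [List.map_cons, List.map_nil]
      rw [PySem.List.pyGetD_neg_one_append_singleton]
      simp
    rw [hfold, hlast, ih]
    rw [List.length_append, List.length_singleton, List.range_succ (n := toks.length + 1), List.map_append]
    congr 1
    · apply List.map_congr_left
      intro k hk
      simp only [List.mem_range] at hk
      rw [List.take_append_of_le_length (by omega)]
    · simp
theorem pvSum_toks (ids : List String) (a : Nat) :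
    ((((ids.map pvFmt)).take a).map (fun t => (t.length : Int))).sum = pvSumW (ids.take a) := by
  rw [← List.map_take, List.map_map]
  unfold pvSumW
  congr 1

theorem pvOkB_bridge (header : List Char) (cs ml : Int) (ids : List String) (k jN : Nat)
    (hj : k + jN ≤ ids.length) :
    (pvOkB (pvPre (ids.map pvFmt)) ((header.length : Int) + 10) cs ml (k : Int) (jN : Int) = true)
      ↔ pvOkP header cs ml (ids.drop k) jN := by
  unfold pvOkB
  have e1 : (k : Int) + (jN : Int) = ((k + jN : Nat) : Int) := by push_cast; ring
  rw [e1, pvPre_eq]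
  rw [PySem.List.pyGetD_natCast, PySem.List.pyGetD_natCast]
  rw [PySem.List.getD_map_range _ _ _ 0 (by simp; omega),
      PySem.List.getD_map_range _ _ _ 0 (by simp; omega)]
  rw [pvSum_toks, pvSum_toks]
  have hsplit : ids.take (k + jN) = ids.take k ++ ((ids.drop k).take jN) := List.take_add ..
  have hdiff : pvSumW (ids.take (k + jN)) - pvSumW (ids.take k) = pvSumW ((ids.drop k).take jN) := by
    rw [hsplit]
    unfold pvSumW
    rw [List.map_append, List.sum_append]
    ring
  unfold pvOkP
  simp only [Bool.and_eq_true, decide_eq_true_eq]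
  constructor
  · rintro ⟨a, b⟩
    exact ⟨a, by omega⟩
  · rintro ⟨a, b⟩
    exact ⟨a, by omega⟩
theorem pvRef_aux (header : List Char) (cs ml : Int) (u : List String) (m : Nat)
    (hm1 : 1 ≤ m) (hmu : m ≤ u.length)
    (hok : ∀ j, 2 ≤ j → j ≤ m → pvOkP header cs ml u j)
    (hstop : m < u.length → ¬ pvOkP header cs ml u (m + 1)) :
    ∀ k, 1 ≤ k → k ≤ m →
      pvRef header cs ml (u.take k) (u.drop k)
        = String.ofList (pvQueryA header (u.take m)) :: pvRef header cs ml [] (u.drop m) := by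
  have H : ∀ d k, 1 ≤ k → k ≤ m → m - k = d →
      pvRef header cs ml (u.take k) (u.drop k)
        = String.ofList (pvQueryA header (u.take m)) :: pvRef header cs ml [] (u.drop m) := by
    intro d
    induction d with
    | zero =>
      intro k hk1 hkm hd
      have hkm' : k = m := by omega
      subst hkm'
      by_cases hend : k < u.length
      · -- drop k u = u[k] :: …, the next id triggers, chunk is emitted
        have hconcat : u.take k ++ [u[k]] = u.take (k + 1) := by
          rw [List.take_add_one]
          simp [List.getElem?_eq_getElem hend]
        have htrig := (pvTrigger_iff header cs ml u (k + 1) (by omega) (by omega)).2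
          (hstop hend)
        have hne : u.take k ≠ [] := List.ne_nil_of_length_pos (by rw [List.length_take]; omega)
        have hLHS : pvRef header cs ml (u.take k) (u.drop k)
            = [String.ofList (pvQueryA header (u.take k))] ++ pvRef header cs ml [u[k]] (u.drop (k + 1)) := by
          conv_lhs => rw [List.drop_eq_getElem_cons hend]
          simp only [pvRef]
          rw [hconcat, if_pos htrig, if_pos hne]
        have hRHS : pvRef header cs ml [] (u.drop k) = pvRef header cs ml [u[k]] (u.drop (k + 1)) := by
          conv_lhs => rw [List.drop_eq_getElem_cons hend]
          exact pvRef_nil_cons header cs ml _ _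
        rw [hLHS, hRHS]
        simp only [List.singleton_append]
      · -- k = m = u.length : final flush
        have : u.length = k := by omega
        rw [List.drop_eq_nil_of_le (by omega)]
        simp only [pvRef]
        have hne : u.take k ≠ [] := List.ne_nil_of_length_pos (by rw [List.length_take]; omega)
        rw [if_pos hne]
        simp
    | succ d ih =>
      intro k hk1 hkm hd
      have hklt : k < m := by omega
      have hkltu : k < u.length := by omega
      rw [List.drop_eq_getElem_cons hkltu]
      simp only [pvRef]
      have hconcat : u.take k ++ [u[k]] = u.take (k + 1) := by
        rw [List.take_add_one]
        simp [List.getElem?_eq_getElem hkltu]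
      rw [hconcat]
      have hok' := hok (k + 1) (by omega) (by omega)
      have hnt := (pvTrigger_iff header cs ml u (k + 1) (by omega) (by omega))
      have : ¬ (cs ≤ (((u.take (k+1)).length : Int)) ∨ ml < ((pvQueryA header (u.take (k+1))).length : Int)) := by
        rw [hnt]
        simpa using hok'
      rw [if_neg this]
      exact ih (k + 1) (by omega) (by omega) (by omega)
  intro k hk1 hkm
  exact H (m - k) k hk1 hkm rfl
theorem pvLoopB_eq (header : List Char) (cs ml : Int) (ids : List String) :
    ∀ (k : Nat), k ≤ ids.length →
      pvLoopB (ids.map pvFmt) (pvPre (ids.map pvFmt)) header ((header.length : Int) + 10)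
          cs ml (ids.length : Int) (k : Int)
        = pvRef header cs ml [] (ids.drop k) := by
  have H : ∀ (d k : Nat), k ≤ ids.length → ids.length - k ≤ d →
      pvLoopBF (ids.map pvFmt) (pvPre (ids.map pvFmt)) header ((header.length : Int) + 10)
          cs ml (ids.length : Int) d (k : Int)
        = pvRef header cs ml [] (ids.drop k) := by
    intro d
    induction d with
    | zero =>
      intro k hk hd
      rw [List.drop_eq_nil_of_le (by omega)]
      simp [pvLoopBF, pvRef]
    | succ d ih =>
      intro k hk hd
      by_cases hlt : k < ids.length
      · simp only [pvLoopBF]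
        rw [if_pos (by exact_mod_cast hlt)]
        set u := ids.drop k with hu_def
        have hulen : u.length = ids.length - k := by
          rw [hu_def, List.length_drop]
        have hune : u ≠ [] := List.ne_nil_of_length_pos (by omega)
        set ok := pvOkB (pvPre (ids.map pvFmt)) ((header.length : Int) + 10) cs ml (k : Int) with hok_def
        have hbr : ∀ jN : Nat, k + jN ≤ ids.length → (ok (jN : Int) = true ↔ pvOkP header cs ml u jN) := by
          intro jN hj
          rw [hok_def, hu_def]
          exact pvOkB_bridge header cs ml ids k jN hj
        have hrem : (ids.length : Int) - (k : Int) = ((ids.length - k : Nat) : Int) := by omega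
        set mI := pvChunkLen ok ((ids.length : Int) - (k : Int)) with hm_def
        have hmI1 : 1 ≤ mI := pvChunkLen_ge ok _
        set mN := mI.toNat with hmN_def
        have hmIN : (mN : Int) = mI := Int.toNat_of_nonneg (by omega)
        -- the four conditions pvRef_aux needs, from the two branches of pvChunkLen
        have hconds : 1 ≤ mN ∧ mN ≤ u.length ∧
            (∀ j, 2 ≤ j → j ≤ mN → pvOkP header cs ml u j) ∧
            (mN < u.length → ¬ pvOkP header cs ml u (mN + 1)) := by
          by_cases hok1 : ok 1 = true
          · have hmb : mI = pvBisect ok 1 ((ids.length : Int) - (k : Int)) := by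
              rw [hm_def]
              unfold pvChunkLen
              rw [if_pos hok1]
            have mono : ∀ i j : Int, 1 ≤ i → i ≤ j → j ≤ (ids.length : Int) - (k : Int) →
                ok j = true → ok i = true := by
              intro i j h1 h2 h3 h4
              have hi' : ((i.toNat : Nat) : Int) = i := Int.toNat_of_nonneg (by omega)
              have hj' : ((j.toNat : Nat) : Int) = j := Int.toNat_of_nonneg (by omega)
              rw [← hi']
              rw [← hj'] at h4
              rw [hbr i.toNat (by omega)]
              rw [hbr j.toNat (by omega)] at h4
              exact pvOkP_mono header cs ml u i.toNat j.toNat (by omega) h4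
            obtain ⟨g1, g2, g3, g4⟩ := pvBisect_spec ok 1 _ hok1 mono
            rw [← hmb] at g1 g2 g3 g4
            have hmax : max 1 ((ids.length : Int) - (k : Int)) = (ids.length : Int) - (k : Int) := by
              omega
            rw [hmax] at g2
            have hmNle : mN ≤ u.length := by omega
            have hOkm : pvOkP header cs ml u mN := by
              rw [← hbr mN (by omega)]
              rw [hmIN]
              exact g3
            refine ⟨by omega, hmNle, ?_, ?_⟩
            · intro j _ hj
              exact pvOkP_mono header cs ml u j mN hj hOkm
            · intro hlt2
              have hfalse : ok ((mN + 1 : Nat) : Int) = false := by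
                apply g4 <;> push_cast <;> omega
              intro hcon
              have hT := (hbr (mN + 1) (by omega)).2 hcon
              rw [hT] at hfalse
              cases hfalse
          · have hm1' : mI = 1 := by
              rw [hm_def]
              unfold pvChunkLen
              rw [if_neg hok1]
            have hmN1 : mN = 1 := by omega
            have hnok1 : ¬ pvOkP header cs ml u 1 := by
              rw [← hbr 1 (by omega)]
              simpa using hok1
            refine ⟨by omega, by omega, by omega, ?_⟩
            · intro _ hcon
              rw [hmN1] at hcon
              exact hnok1 (pvOkP_mono header cs ml u 1 2 (by omega) hcon)
        obtain ⟨hc1, hc2, hc3, hc4⟩ := hconds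
        -- the emitted chunk string is A's query on the first mN remaining ids
        have hslice : PySem.List.slice (ids.map pvFmt) (some (k : Int)) (some ((k : Int) + mI))
            = (u.take mN).map pvFmt := by
          rw [← hmIN, PySem.List.slice_natCast_add]
          rw [hu_def, ← List.map_drop, ← List.map_take]
        -- recursive call = pvRef on the rest
        have hrec : pvLoopBF (ids.map pvFmt) (pvPre (ids.map pvFmt)) header ((header.length : Int) + 10)
              cs ml (ids.length : Int) d ((k : Int) + mI)
            = pvRef header cs ml [] (u.drop mN) := by
          have e : (k : Int) + mI = ((k + mN : Nat) : Int) := by push_cast; omega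
          rw [e, ih (k + mN) (by omega) (by omega)]
          rw [hu_def, List.drop_drop]
        rw [hslice, hrec]
        -- fold the cons into pvQueryA and apply the pvRef characterization
        have hq : (header ++ "subject:(".toList ++
              PySem.Chars.join " OR ".toList ((u.take mN).map pvFmt) ++ [')'])
            = pvQueryA header (u.take mN) := rfl
        rw [hq]
        have hstep : pvRef header cs ml [] u = pvRef header cs ml (u.take 1) (u.drop 1) := by
          obtain ⟨a, t, he⟩ := List.exists_cons_of_ne_nil hune
          rw [he, pvRef_nil_cons]
          rfl
        rw [hstep, pvRef_aux header cs ml u mN hc1 hc2 hc3 hc4 1 (by omega) (by omega)]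
      · rw [List.drop_eq_nil_of_le (by omega)]
        simp only [pvLoopBF]
        rw [if_neg (by omega)]
        simp [pvRef]
  intro k hk
  show pvLoopBF (ids.map pvFmt) (pvPre (ids.map pvFmt)) header ((header.length : Int) + 10)
      cs ml (ids.length : Int) ((ids.length : Int) - (k : Int)).toNat (k : Int)
    = pvRef header cs ml [] (ids.drop k)
  exact H (((ids.length : Int) - (k : Int)).toNat) k hk (by omega)

-- ===== VERDICT (by name: the statement is the Claim_ definition above) =====
theorem build_subject_query_chunks_spec : Claim_equal_build_subject_query_chunks := by
  intro ids em ad inc cs ml _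
  unfold Spec_build_subject_query_chunks
  unfold build_subject_query_chunks build_subject_query_chunks_alt
  simp only []
  have h10 : ("subject:()".toList.length : Int) = 10 := by decide
  rw [h10]
  have hA := pvFoldA (pvHeader em ad inc) cs ml ids [] []
  have hB := pvLoopB_eq (pvHeader em ad inc) cs ml ids 0 (Nat.zero_le _)
  simp only [List.drop_zero, Int.natCast_zero] at hB
  simp only [List.nil_append] at hA
  rw [hB]
  exact hA
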